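-- pv_equiv track=rewrite | github.com/GeeTransit/twoten | game.py | grid_shifted
-- ===== SOURCE A (Python) =====
-- def nums_compressed(nums: list[int]) -> tuple[list[int], list[int]]:
--     """Sums up consecutive pairs and returns new list and nums removed
--
--     >>> nums_compressed([2, 2, 4, 4, 4, 8])
--     ([4, 8, 4, 8], [2, 4])
--
--     """
--     # Processes nums as a stack with the first element at the top
--     stack = nums[::-1]
--     result = []
--     removed = []
--     # Until the stack is empty, check if the top 2 elements are the same
--     while stack:
--         if len(stack) < 2:
--             result.append(stack.pop())
--             continue
--         if stack[-1] != stack[-2]: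
--             result.append(stack.pop())
--             continue
--         # Top 2 are the same. Add to removed list and sum them
--         removed.append(stack[-1])
--         result.append(stack.pop() + stack.pop())
--     # Return the compressed list and the nums that were removed
--     return result, removed
--
-- def grid_shifted(grid: list[list[int]]) -> tuple[list[list[int]], list[int]]:
--     """Returns a new grid with 2048 left applied and nums removed
--
--     >>> grid_shifted([[2, 0, 2], [4, 4, 4], [0, 2, 0]])
--     ([[4, 0, 0], [8, 4, 0], [2, 0, 0]], [2, 4])
--
--     """
--     result = []
--     removed = []
--     for row in grid:
--         zeroless = [num for num in row if num != 0]
--         compressed, row_removed = nums_compressed(zeroless)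
--         compressed += [0] * (len(row) - len(compressed))  # Pad to row's length
--         removed += row_removed
--         result.append(compressed)
--     return result, removed
-- ===== SOURCE B (Python) =====
-- def grid_shifted(grid):
--     """2048 left-shift via run-length counting: each maximal run of c equal
--     nonzero values v becomes c//2 merged tiles 2*v followed by c%2 leftover v,
--     with c//2 copies of v recorded as removed."""
--     result = []
--     removed = []
--     for row in grid:
--         zeroless = [n for n in row if n != 0]
--         out = []
--         i = 0
--         while i < len(zeroless):
--             v = zeroless[i]
--             j = i
--             while j < len(zeroless) and zeroless[j] == v:
--                 j += 1
--             c = j - i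
--             out += [2 * v] * (c // 2) + [v] * (c % 2)
--             removed += [v] * (c // 2)
--             i = j
--         out += [0] * (len(row) - len(out))
--         result.append(out)
--     return result, removed
-- ===== Notes on version B (the rewrite author's own statement) =====
-- stated objective: alternative
-- what changed: Replaces the stack push/pop pair-merging simulation with run-length counting: each maximal run of c equal nonzero values v directly yields c//2 merged tiles and c//2 removed entries.
import Mathlib
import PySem

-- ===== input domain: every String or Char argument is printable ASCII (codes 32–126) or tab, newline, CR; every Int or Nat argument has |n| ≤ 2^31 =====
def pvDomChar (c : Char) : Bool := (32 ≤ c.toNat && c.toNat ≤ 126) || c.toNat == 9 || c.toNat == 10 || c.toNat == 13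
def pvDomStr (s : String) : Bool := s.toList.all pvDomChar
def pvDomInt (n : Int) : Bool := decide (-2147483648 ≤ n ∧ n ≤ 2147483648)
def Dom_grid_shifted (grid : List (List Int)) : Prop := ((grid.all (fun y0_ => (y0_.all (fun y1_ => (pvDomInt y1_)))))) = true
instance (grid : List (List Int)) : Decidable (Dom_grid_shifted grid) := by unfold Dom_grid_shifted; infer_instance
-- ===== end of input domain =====

-- B replaces A's stack push/pop pair-merging simulation with run-length counting over maximal runs (alternative decomposition, same cost).


-- ===== PORT A =====
-- A's while loop over the stack; the stack is represented top-first (Python's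
-- stack = nums[::-1] with the top at the END, so top-first order is nums itself).
def ncLoop (stack result removed : List Int) : List Int × List Int :=
  match stack with
  | [] => (result, removed)
  | [x] => ncLoop [] (result ++ [x]) removed
  | x :: y :: rest =>
    if x ≠ y then ncLoop (y :: rest) (result ++ [x]) removed
    else ncLoop rest (result ++ [x + y]) (removed ++ [x])
termination_by stack.length

def nums_compressed (nums : List Int) : List Int × List Int :=
  -- stack = nums[::-1]; ncLoop takes it in top-first order, i.e. nums
  ncLoop nums [] []

def grid_shifted (grid : List (List Int)) : List (List Int) × List Int :=
  grid.foldl (fun (acc : List (List Int) × List Int) row =>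
    let zeroless := row.filter (fun n => n ≠ 0)
    let cr := nums_compressed zeroless
    let compressed := cr.1 ++ List.replicate (row.length - cr.1.length) 0
    (acc.1 ++ [compressed], acc.2 ++ cr.2)) ([], [])

-- ===== PORT B =====
-- B's run-length loop: the inner while counting the run is takeWhile/dropWhile.
def altRow (xs : List Int) : List Int × List Int :=
  match xs with
  | [] => ([], [])
  | v :: rest =>
    let c := 1 + (rest.takeWhile (fun n => n = v)).length
    let p := altRow (rest.dropWhile (fun n => n = v))
    (List.replicate (c / 2) (2 * v) ++ List.replicate (c % 2) v ++ p.1,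
     List.replicate (c / 2) v ++ p.2)
termination_by xs.length
decreasing_by
  simp only [List.length_cons]
  exact Nat.lt_succ_of_le (List.length_dropWhile_le _ _)

def grid_shifted_alt (grid : List (List Int)) : List (List Int) × List Int :=
  grid.foldl (fun (acc : List (List Int) × List Int) row =>
    let zeroless := row.filter (fun n => n ≠ 0)
    let p := altRow zeroless
    (acc.1 ++ [p.1 ++ List.replicate (row.length - p.1.length) 0], acc.2 ++ p.2)) ([], [])

-- ===== PRECONDITION & SPEC =====
def Spec_grid_shifted (grid : List (List Int)) (out : List (List Int) × List Int) : Prop := out = grid_shifted_alt grid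
instance (grid : List (List Int)) (out : List (List Int) × List Int) : Decidable (Spec_grid_shifted grid out) := by unfold Spec_grid_shifted; infer_instance

-- ===== CLAIM (what is proved, stated in full; the proofs are below) =====
def Claim_equal_grid_shifted : Prop := ∀ (grid : List (List Int)), Dom_grid_shifted grid → Spec_grid_shifted grid (grid_shifted grid)

-- ===== LEMMAS AND PROOFS =====

-- A maximal run of c copies of v (next element ≠ v) is consumed by ncLoop into
-- c/2 merged tiles 2*v, c%2 leftover v, and c/2 removed v's.
lemma ncLoop_run (c : Nat) (hc : 1 ≤ c) (v : Int) (d res rem : List Int)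
    (hd : ∀ w, d.head? = some w → w ≠ v) :
    ncLoop (List.replicate c v ++ d) res rem =
      ncLoop d (res ++ List.replicate (c / 2) (2 * v) ++ List.replicate (c % 2) v)
        (rem ++ List.replicate (c / 2) v) := by
  induction c using Nat.strong_induction_on generalizing res rem with
  | _ c ih =>
    match c, hc with
    | 1, _ =>
      match d, hd with
      | [], _ => simp [ncLoop]
      | w :: d', hd =>
        have hw : ¬ (v = w) := fun h => hd w rfl h.symm
        simp [ncLoop, hw]
    | 2, _ =>
      match d, hd with
      | [], _ => simp [ncLoop, two_mul]
      | w :: d', hd => simp [ncLoop, two_mul]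
    | (n+3), _ =>
      have step : List.replicate (n+3) v ++ d = v :: v :: (List.replicate (n+1) v ++ d) := by
        simp [List.replicate_succ]
      rw [step]
      show ncLoop (v :: v :: (List.replicate (n+1) v ++ d)) res rem = _
      rw [ncLoop]
      simp only [ne_eq, not_true_eq_false, if_false]
      rw [ih (n+1) (by omega) (by omega) (res ++ [v + v]) (rem ++ [v])]
      have h2 : (n+3) / 2 = (n+1) / 2 + 1 := by omega
      have h3 : (n+3) % 2 = (n+1) % 2 := by omega
      rw [h2, h3]
      simp [List.replicate_succ, two_mul]

lemma ncLoop_eq_altRow (xs : List Int) : ∀ res rem,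
    ncLoop xs res rem = (res ++ (altRow xs).1, rem ++ (altRow xs).2) := by
  induction xs using altRow.induct with
  | case1 => intro res rem; simp [ncLoop, altRow]
  | case2 v rest ih =>
    intro res rem
    have ht : rest.takeWhile (fun n => decide (n = v)) =
        List.replicate ((rest.takeWhile (fun n => decide (n = v))).length) v := by
      apply List.eq_replicate_of_mem
      intro b hb
      have := List.mem_takeWhile_imp hb
      simpa using this
    have hdecomp : v :: rest =
        List.replicate (1 + (rest.takeWhile (fun n => decide (n = v))).length) v ++
          rest.dropWhile (fun n => decide (n = v)) := by
      conv_lhs => rw [← List.takeWhile_append_dropWhile (p := fun n => decide (n = v)) (l := rest)]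
      rw [List.replicate_add, List.replicate_one]
      simp only [List.cons_append]
      nth_rewrite 1 [ht]
      rfl
    have hd : ∀ w, (rest.dropWhile (fun n => decide (n = v))).head? = some w → w ≠ v := by
      intro w hw
      have h := List.head?_dropWhile_not (fun n => decide (n = v)) rest
      rw [hw] at h
      simpa using h
    have key := ncLoop_run (1 + (rest.takeWhile (fun n => decide (n = v))).length)
      (by omega) v (rest.dropWhile (fun n => decide (n = v))) res rem hd
    rw [← hdecomp] at key
    rw [key, ih]
    conv_rhs => rw [altRow.eq_def]
    simp

theorem grid_shifted_eq_alt (grid : List (List Int)) :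
    grid_shifted grid = grid_shifted_alt grid := by
  unfold grid_shifted grid_shifted_alt
  congr 1
  funext acc row
  simp only [nums_compressed, ncLoop_eq_altRow, List.nil_append]

-- ===== VERDICT (by name: the statement is the Claim_ definition above) =====
theorem grid_shifted_spec : Claim_equal_grid_shifted := by
  intro grid _
  unfold Spec_grid_shifted
  exact grid_shifted_eq_alt grid
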